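-- pv_equiv track=rewrite | github.com/agustin-panozzo/juego_L | juego_L.py | obtener_centro_L
-- ===== SOURCE A (Python) =====
-- def intercambiar_pos(posiciones: list) -> list:
--     """
--     Intercambia filas por columnas y las devuelve.
--     """
--     if str(posiciones[0]).isdigit(): #Si la posicion es una sola (No es lista de listas)
--         pos_nuevas = [posiciones[1], posiciones[0]]
--     else:
--         pos_nuevas = []
--         for i in range(len(posiciones)):
--             pos_nuevas.append([posiciones[i][1], posiciones[i][0]])
--     return pos_nuevas
--
-- def l_esta_horizontal(posiciones: list) -> bool:
--     """
--     Verifica si la ficha L se encuentra en posición horizontal.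
--     """
--     esta_horizontal = True
--     columnas = []
--     for i in range(len(posiciones)):
--         columnas.append(posiciones[i][1])
--     for i in range(len(posiciones)):
--         if columnas.count(posiciones[i][1]) == 3:
--             esta_horizontal = False
--     return esta_horizontal
--
-- def obtener_centro_L(posiciones: list) -> list:
--     """
--     Obtiene la coordenada del centro de rotación de la L y la devuelve.
--     """
--     pos_ant = []
--     eje_central = []
--     columnas = []
--     columna_central = -1
--     if l_esta_horizontal(posiciones):
--         pos_ant = posiciones
--         posiciones = intercambiar_pos(posiciones)
--     for i in range(len(posiciones)):
--         columnas.append(posiciones[i][1])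
--     if columnas.count(columnas[0]) == 3: #busco columna principal de L
--         columna_central = columnas[0] #Si el primer valor no se repite, entonces el segundo sí.
--     else:
--         columna_central = columnas[1]
--     for i in range(len(posiciones)):
--         if posiciones[i][1] == columna_central:
--             eje_central.append(posiciones[i])
--     if pos_ant:
--         if l_esta_horizontal(pos_ant):
--             eje_central = intercambiar_pos(eje_central)
--     return eje_central[1]
-- ===== SOURCE B (Python) =====
-- def obtener_centro_L(posiciones: list) -> list:
--     """
--     Obtiene la coordenada del centro de rotacion de la L y la devuelve.
--     Trata ambas orientaciones simetricamente: cuenta valores por eje y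
--     toma la segunda celda (en orden de entrada) del brazo largo.
--     """
--     cols = [p[1] for p in posiciones]
--     if any(cols.count(c) == 3 for c in cols):
--         # vertical: the long arm sits in one column
--         central = cols[0] if cols.count(cols[0]) == 3 else cols[1]
--         return [p for p in posiciones if p[1] == central][1]
--     # horizontal: the long arm sits in one row; answer as a [row, col] pair
--     rows = [p[0] for p in posiciones]
--     central = rows[0] if rows.count(rows[0]) == 3 else rows[1]
--     cell = [p for p in posiciones if p[0] == central][1]
--     return [cell[0], cell[1]]
-- ===== Notes on version B (the rewrite author's own statement) =====
-- stated objective: simpler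
-- what changed: Drops A's transpose/flag/transpose-back machinery and its range-index accumulator loops: B counts axis values directly with comprehensions, picks the long arm on the original list for either orientation, and returns its second cell in input order.
import Mathlib
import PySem

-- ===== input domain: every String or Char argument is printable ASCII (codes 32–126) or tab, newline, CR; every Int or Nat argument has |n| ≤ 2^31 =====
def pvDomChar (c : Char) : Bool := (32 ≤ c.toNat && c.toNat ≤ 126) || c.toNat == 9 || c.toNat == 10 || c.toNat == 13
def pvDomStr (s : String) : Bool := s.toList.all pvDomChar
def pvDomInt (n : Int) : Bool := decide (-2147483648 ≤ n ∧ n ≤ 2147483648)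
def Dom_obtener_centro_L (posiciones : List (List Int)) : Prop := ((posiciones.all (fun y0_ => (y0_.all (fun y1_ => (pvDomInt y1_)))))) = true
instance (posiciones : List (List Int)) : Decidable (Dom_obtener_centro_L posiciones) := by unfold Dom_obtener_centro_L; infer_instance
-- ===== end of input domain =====

-- B drops A's transpose/flag/transpose-back machinery: it counts axis values
-- directly on the input list and returns the long arm's second cell (simpler).

-- ===== PORT A =====

-- str(posiciones[0]).isdigit() is False on every list-of-lists argument (the
-- repr of a list begins with '['), so only the else branch is ported; exact on Dom.
def intercambiar_pos (posiciones : List (List Int)) : List (List Int) :=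
  (PySem.List.pyRange 0 (posiciones.length : Int) 1).foldl
    (fun pos_nuevas i =>
      pos_nuevas ++ [[PySem.List.pyGetD (PySem.List.pyGetD posiciones i []) 1 0,
                      PySem.List.pyGetD (PySem.List.pyGetD posiciones i []) 0 0]]) []

def l_esta_horizontal (posiciones : List (List Int)) : Bool :=
  let columnas := (PySem.List.pyRange 0 (posiciones.length : Int) 1).foldl
    (fun acc i => acc ++ [PySem.List.pyGetD (PySem.List.pyGetD posiciones i []) 1 0]) []
  (PySem.List.pyRange 0 (posiciones.length : Int) 1).foldl
    (fun esta i =>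
      if PySem.List.count columnas (PySem.List.pyGetD (PySem.List.pyGetD posiciones i []) 1 0) == 3
      then false else esta) true

def obtener_centro_L (posiciones : List (List Int)) : List Int :=
  let pos_ant : List (List Int) := []
  let pos_ant := if l_esta_horizontal posiciones then posiciones else pos_ant
  let posiciones2 := if l_esta_horizontal posiciones then intercambiar_pos posiciones else posiciones
  let columnas := (PySem.List.pyRange 0 (posiciones2.length : Int) 1).foldl
    (fun acc i => acc ++ [PySem.List.pyGetD (PySem.List.pyGetD posiciones2 i []) 1 0]) []
  let columna_central :=
    if PySem.List.count columnas (PySem.List.pyGetD columnas 0 0) == 3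
    then PySem.List.pyGetD columnas 0 0 else PySem.List.pyGetD columnas 1 0
  let eje_central := (PySem.List.pyRange 0 (posiciones2.length : Int) 1).foldl
    (fun acc i =>
      if PySem.List.pyGetD (PySem.List.pyGetD posiciones2 i []) 1 0 == columna_central
      then acc ++ [PySem.List.pyGetD posiciones2 i []] else acc) []
  let eje_central :=
    if pos_ant ≠ [] then
      (if l_esta_horizontal pos_ant then intercambiar_pos eje_central else eje_central)
    else eje_central
  PySem.List.pyGetD eje_central 1 []

-- ===== PORT B =====
def obtener_centro_L_alt (posiciones : List (List Int)) : List Int :=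
  let cols := posiciones.map (fun p => PySem.List.pyGetD p 1 0)
  if cols.any (fun c => PySem.List.count cols c == 3) then
    let central := if PySem.List.count cols (PySem.List.pyGetD cols 0 0) == 3
                   then PySem.List.pyGetD cols 0 0 else PySem.List.pyGetD cols 1 0
    PySem.List.pyGetD (posiciones.filter (fun p => PySem.List.pyGetD p 1 0 == central)) 1 []
  else
    let rows := posiciones.map (fun p => PySem.List.pyGetD p 0 0)
    let central := if PySem.List.count rows (PySem.List.pyGetD rows 0 0) == 3
                   then PySem.List.pyGetD rows 0 0 else PySem.List.pyGetD rows 1 0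
    let cell := PySem.List.pyGetD (posiciones.filter (fun p => PySem.List.pyGetD p 0 0 == central)) 1 []
    [PySem.List.pyGetD cell 0 0, PySem.List.pyGetD cell 1 0]

-- ===== PRECONDITION & SPEC =====
-- Exactly the inputs on which the Python A returns normally (no IndexError):
-- a nonempty list of cells each holding at least two coordinates, whose
-- long arm (selected by A's three-in-a-line rule on the relevant axis)
-- contains a second cell; in the horizontal case at least two cells overall.
def Pre_obtener_centro_L (posiciones : List (List Int)) : Prop :=
  posiciones ≠ [] ∧ (∀ p ∈ posiciones, 2 ≤ p.length) ∧
  (let cols := posiciones.map (fun p => PySem.List.pyGetD p 1 0)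
   if cols.any (fun c => PySem.List.count cols c == 3) then
     (let central := if PySem.List.count cols (PySem.List.pyGetD cols 0 0) == 3
                     then PySem.List.pyGetD cols 0 0 else PySem.List.pyGetD cols 1 0
      2 ≤ (posiciones.filter (fun p => PySem.List.pyGetD p 1 0 == central)).length)
   else
     (2 ≤ posiciones.length ∧
      let rows := posiciones.map (fun p => PySem.List.pyGetD p 0 0)
      let central := if PySem.List.count rows (PySem.List.pyGetD rows 0 0) == 3
                     then PySem.List.pyGetD rows 0 0 else PySem.List.pyGetD rows 1 0
      2 ≤ (posiciones.filter (fun p => PySem.List.pyGetD p 0 0 == central)).length))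
instance (posiciones : List (List Int)) : Decidable (Pre_obtener_centro_L posiciones) := by
  unfold Pre_obtener_centro_L; infer_instance

def pvWitness_obtener_centro_L : List (List Int) := [[0, 1], [1, 1], [2, 1], [2, 2]]

def Spec_obtener_centro_L (posiciones : List (List Int)) (out : List Int) : Prop := out = obtener_centro_L_alt posiciones
instance (posiciones : List (List Int)) (out : List Int) : Decidable (Spec_obtener_centro_L posiciones out) := by unfold Spec_obtener_centro_L; infer_instance

-- ===== CLAIM (what is proved, stated in full; the proofs are below) =====
def Claim_equal_obtener_centro_L : Prop := ∀ (posiciones : List (List Int)), Dom_obtener_centro_L posiciones → Pre_obtener_centro_L posiciones → Spec_obtener_centro_L posiciones (obtener_centro_L posiciones)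

-- ===== LEMMAS AND PROOFS =====

theorem flag_foldl {α : Type} (P : α → Bool) (l : List α) (b : Bool) :
    l.foldl (fun esta x => if P x then false else esta) b = (b && !l.any P) := by
  induction l generalizing b with
  | nil => simp
  | cons a t ih =>
    simp only [List.foldl_cons]
    rw [ih]
    cases h : P a <;> simp [h]

theorem getD0_pair (a b : Int) : PySem.List.pyGetD [a, b] 0 0 = a := by
  simp

theorem getD1_pair (a b : Int) : PySem.List.pyGetD [a, b] 1 0 = b := by
  have := PySem.List.pyGetD_natCast (xs := [a, b]) (n := 1) (d := 0)
  simpa using this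

theorem fold_cols (l : List (List Int)) :
    (PySem.List.pyRange 0 (l.length : Int) 1).foldl
      (fun acc i => acc ++ [PySem.List.pyGetD (PySem.List.pyGetD l i []) 1 0]) ([] : List Int)
    = l.map (fun p => PySem.List.pyGetD p 1 0) := by
  rw [PySem.List.foldl_pyRange_zero_pyGetD' l [] (fun acc p => acc ++ [PySem.List.pyGetD p 1 0]) []]
  simpa using PySem.List.foldl_append_singleton_eq_map (l := l) (f := fun p => PySem.List.pyGetD p 1 0) (acc := [])

theorem intercambiar_eq (l : List (List Int)) :
    intercambiar_pos l
    = l.map (fun p => [PySem.List.pyGetD p 1 0, PySem.List.pyGetD p 0 0]) := by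
  unfold intercambiar_pos
  rw [PySem.List.foldl_pyRange_zero_pyGetD' l []
      (fun acc p => acc ++ [[PySem.List.pyGetD p 1 0, PySem.List.pyGetD p 0 0]]) []]
  simpa using PySem.List.foldl_append_singleton_eq_map (l := l)
    (f := fun p => [PySem.List.pyGetD p 1 0, PySem.List.pyGetD p 0 0]) (acc := [])

theorem fold_eje (l : List (List Int)) (c : Int) :
    (PySem.List.pyRange 0 (l.length : Int) 1).foldl
      (fun acc i =>
        if PySem.List.pyGetD (PySem.List.pyGetD l i []) 1 0 == c
        then acc ++ [PySem.List.pyGetD l i []] else acc) ([] : List (List Int))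
    = l.filter (fun p => PySem.List.pyGetD p 1 0 == c) := by
  rw [PySem.List.foldl_pyRange_zero_pyGetD' l []
      (fun acc p => if PySem.List.pyGetD p 1 0 == c then acc ++ [p] else acc) []]
  simpa using PySem.List.foldl_append_if_eq_filter
    (l := l) (p := fun p => PySem.List.pyGetD p 1 0 == c) (acc := [])

theorem horizontal_eq (l : List (List Int)) :
    l_esta_horizontal l
    = !((l.map (fun p => PySem.List.pyGetD p 1 0)).any
        (fun c => PySem.List.count (l.map (fun p => PySem.List.pyGetD p 1 0)) c == 3)) := by
  unfold l_esta_horizontal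
  rw [fold_cols l]
  rw [PySem.List.foldl_pyRange_zero_pyGetD' l []
      (fun esta p =>
        if PySem.List.count (l.map (fun q => PySem.List.pyGetD q 1 0)) (PySem.List.pyGetD p 1 0) == 3
        then false else esta) true]
  rw [flag_foldl]
  simp [List.any_map, Function.comp_def]

-- ===== VERDICT (by name: the statement is the Claim_ definition above) =====
theorem obtener_centro_L_spec : Claim_equal_obtener_centro_L := by
  intro l _ hpre
  obtain ⟨hne, _, harm⟩ := hpre
  unfold Spec_obtener_centro_L obtener_centro_L obtener_centro_L_alt
  by_cases hv : ((l.map (fun p => PySem.List.pyGetD p 1 0)).any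
      (fun c => PySem.List.count (l.map (fun p => PySem.List.pyGetD p 1 0)) c == 3)) = true
  · -- vertical: A does not transpose; both sides are the same count/filter/index
    simp only [horizontal_eq, hv, Bool.not_true, if_neg, Bool.false_eq_true,
      not_false_eq_true, if_pos, fold_cols, fold_eje]
    simp
  · -- horizontal: A transposes, works, transposes back
    rw [Bool.not_eq_true] at hv
    simp only [hv, Bool.false_eq_true, if_false] at harm
    obtain ⟨-, hF⟩ := harm
    simp only [horizontal_eq, hv, Bool.not_false, if_pos, intercambiar_eq, fold_cols, fold_eje,
      List.map_map, List.filter_map, Function.comp_def, getD0_pair, getD1_pair, hne, ne_eq,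
      not_false_eq_true, Bool.false_eq_true, if_false]
    generalize hg : List.filter _ l = F at hF ⊢
    have h1 : 1 < F.length := by omega
    have e1 : ∀ (xs : List (List Int)) (d : List Int), PySem.List.pyGetD xs 1 d = xs.getD 1 d := by
      intro xs d; simpa using PySem.List.pyGetD_natCast (xs := xs) (n := 1) (d := d)
    rw [e1, e1, List.getD_eq_getElem _ _ (by simpa using h1), List.getD_eq_getElem _ _ h1,
      List.getElem_map]
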